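-- pv_equiv track=rewrite | github.com/detective-sokka/Competitive-Programming | SetNumbers.py | NearestTwoPower
-- ===== SOURCE A (Python) =====
-- def NearestTwoPower(input_val):
--     if input_val & (input_val + 1) == 0:
--         return input_val
--
--     count = 0
--     while input_val != 0:
--         count = count + 1
--         input_val = input_val >> 1
--
--     return 2 ** (count - 1) - 1
-- ===== SOURCE B (Python) =====
-- def NearestTwoPower(input_val):
--     result = 0
--     mask = 0
--     while mask <= input_val:
--         result = mask
--         mask = mask * 2 + 1
--     return result
-- ===== Notes on version B (the rewrite author's own statement) =====
-- stated objective: simpler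
-- what changed: Replaces the all-ones special case plus bit-count-then-2**(count-1)-1 closed form by a single upward loop that keeps the largest all-ones mask (2^k-1) not exceeding the input, advancing mask = mask*2+1.
-- outside the precondition, e.g. on NearestTwoPower(-1): A returns -1, B returns 0
import Mathlib
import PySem

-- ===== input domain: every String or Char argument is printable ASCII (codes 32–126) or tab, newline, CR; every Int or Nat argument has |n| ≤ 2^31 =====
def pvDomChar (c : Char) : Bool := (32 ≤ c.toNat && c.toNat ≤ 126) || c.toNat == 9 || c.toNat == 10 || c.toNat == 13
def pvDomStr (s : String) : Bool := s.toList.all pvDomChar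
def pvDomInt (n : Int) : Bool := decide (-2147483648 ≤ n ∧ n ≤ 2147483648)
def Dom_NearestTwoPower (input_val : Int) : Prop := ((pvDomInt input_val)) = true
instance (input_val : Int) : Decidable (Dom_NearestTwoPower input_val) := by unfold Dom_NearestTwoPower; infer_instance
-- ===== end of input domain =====

-- B replaces A's all-ones special case + bit-count/closed-form by one upward mask-accumulation loop (objective: simpler).

-- ===== PORT A =====
-- A's counting loop 'while input_val != 0: count += 1; input_val >>= 1'.
-- The '0 < v' guard is a totality guard only: Python loops forever on v < 0 (excluded by Pre_),
-- and for v = 0 both return count.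
def pvCountA (v : Int) (count : Int) : Int :=
  if h : 0 < v then pvCountA (v >>> (1 : Nat)) (count + 1) else count
termination_by v.toNat
decreasing_by
  rw [Int.shiftRight_eq_div_pow]
  omega

def NearestTwoPower (input_val : Int) : Int :=
  if PySem.Int.band input_val (input_val + 1) = 0 then input_val
  else 2 ^ ((pvCountA input_val 0 - 1).toNat) - 1

-- ===== PORT B =====
-- Source B's loop 'while mask <= input_val: result = mask; mask = mask*2 + 1'.
-- The '0 ≤ mask' conjunct is a totality guard only: mask starts at 0 and stays ≥ 0 on every run.
def pvMaskLoop (result mask input_val : Int) : Int :=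
  if h : 0 ≤ mask ∧ mask ≤ input_val then pvMaskLoop mask (mask * 2 + 1) input_val else result
termination_by (input_val + 1 - mask).toNat
decreasing_by omega

def NearestTwoPower_alt (input_val : Int) : Int :=
  pvMaskLoop 0 0 input_val

-- ===== PRECONDITION & SPEC =====
-- Pre_ excludes negative inputs: Python A infinite-loops on every negative input except -1,
-- where its all-ones test accidentally fires and returns -1 while B returns 0; negative
-- values are outside the function's purpose (rounding down to the nearest 2^k - 1).
def Pre_NearestTwoPower (input_val : Int) : Prop := 0 ≤ input_val
instance (input_val : Int) : Decidable (Pre_NearestTwoPower input_val) := by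
  unfold Pre_NearestTwoPower; infer_instance

def pvWitness_NearestTwoPower : Int := 5

def Spec_NearestTwoPower (input_val : Int) (out : Int) : Prop := out = NearestTwoPower_alt input_val
instance (input_val : Int) (out : Int) : Decidable (Spec_NearestTwoPower input_val out) := by
  unfold Spec_NearestTwoPower; infer_instance

-- ===== CLAIM (what is proved, stated in full; the proofs are below) =====
def Claim_equal_NearestTwoPower : Prop := ∀ (input_val : Int), Dom_NearestTwoPower input_val → Pre_NearestTwoPower input_val → Spec_NearestTwoPower input_val (NearestTwoPower input_val)

-- ===== LEMMAS AND PROOFS =====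

-- Two dyadic brackets around the same number have the same exponent.
lemma pv_bracket_unique {x a b : Nat} (h1 : 2 ^ a ≤ x) (h2 : x < 2 ^ (a + 1))
    (h3 : 2 ^ b ≤ x) (h4 : x < 2 ^ (b + 1)) : a = b := by
  rcases lt_trichotomy a b with h | h | h
  · have : 2 ^ (a + 1) ≤ 2 ^ b := Nat.pow_le_pow_right (by omega) (by omega)
    omega
  · exact h
  · have : 2 ^ (b + 1) ≤ 2 ^ a := Nat.pow_le_pow_right (by omega) (by omega)
    omega

-- m & (m+1) == 0  iff  m is all-ones (m + 1 a power of two).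
lemma pv_land_succ_iff (m : Nat) : m &&& (m + 1) = 0 ↔ ∃ t, m + 1 = 2 ^ t := by
  induction m using Nat.strong_induction_on with
  | _ m ih =>
    rcases Nat.even_or_odd m with ⟨a, ha⟩ | ⟨a, ha⟩
    · -- m = 2a
      rcases Nat.eq_zero_or_pos a with rfl | hpos
      · simp only [ha]
        constructor
        · intro _; exact ⟨0, rfl⟩
        · intro _; rfl
      · have hm : m = 2 * a := by omega
        have hb : (2 * a) &&& (2 * a + 1) = 2 * a := by
          have := Nat.land_bit false a true a
          simpa using this
        constructor
        · intro h; rw [hm] at h; rw [hb] at h; omega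
        · rintro ⟨t, ht⟩
          exfalso
          rcases t with _ | t
          · omega
          · have : 2 ∣ 2 ^ (t + 1) := dvd_pow_self 2 (by omega)
            omega
    · -- m = 2a + 1
      have hm : m = 2 * a + 1 := by omega
      have hb : (2 * a + 1) &&& (2 * a + 2) = 2 * (a &&& (a + 1)) := by
        have := Nat.land_bit true a false (a + 1)
        simpa [Nat.mul_add] using this
      have hrec := ih a (by omega)
      rw [hm]
      have h2 : 2 * a + 1 + 1 = 2 * a + 2 := by omega
      rw [h2, hb]
      constructor
      · intro h
        have : a &&& (a + 1) = 0 := by omega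
        obtain ⟨t, ht⟩ := hrec.mp this
        exact ⟨t + 1, by rw [pow_succ]; omega⟩
      · rintro ⟨t, ht⟩
        rcases t with _ | t
        · omega
        · have : a + 1 = 2 ^ t := by
            have := pow_succ 2 t
            omega
          have : a &&& (a + 1) = 0 := hrec.mpr ⟨t, this⟩
          omega

lemma pv_countA_eq (m : Nat) : ∀ c : Int, pvCountA (m : Int) c = c + (PySem.Int.bitLength (m : Int) : Int) := by
  induction m using Nat.strong_induction_on with
  | _ m ih =>
    intro c
    rcases Nat.eq_zero_or_pos m with rfl | hpos
    · rw [pvCountA]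
      simp [PySem.Int.bitLength_zero]
    · rw [pvCountA]
      have hv : (0 : Int) < (m : Int) := by exact_mod_cast hpos
      rw [dif_pos hv]
      have hshift : ((m : Int) >>> (1 : Nat)) = ((m / 2 : Nat) : Int) := by
        rw [Int.shiftRight_eq_div_pow]
        omega
      rw [hshift, ih (m / 2) (by omega) (c + 1),
        PySem.Int.bitLength_natCast hpos]
      push_cast
      ring

-- The B-side loop, started at mask = 2^j - 1 ≤ m + 1, lands on 2^k - 1 where 2^k ≤ m+1 < 2^(k+1).
lemma pv_loopB (m k : Nat) (hk1 : 2 ^ k ≤ m + 1) (hk2 : m + 1 < 2 ^ (k + 1)) :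
    ∀ (j : Nat) (r : Int), 2 ^ j ≤ m + 1 →
      pvMaskLoop r ((2 : Int) ^ j - 1) (m : Int) = (2 : Int) ^ k - 1 := by
  intro j
  induction hd : k + 1 - j using Nat.strong_induction_on generalizing j with
  | _ d ihd =>
    intro r hj
    have hjk : j ≤ k := by
      by_contra hgt
      have : 2 ^ (k + 1) ≤ 2 ^ j := Nat.pow_le_pow_right (by omega) (by omega)
      omega
    have hpow : (1 : Int) ≤ (2 : Int) ^ j := one_le_pow₀ (by omega)
    rw [pvMaskLoop]
    rw [dif_pos ⟨by omega, by
      have hInt : ((2 ^ j : Nat) : Int) ≤ ((m + 1 : Nat) : Int) := by exact_mod_cast hj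
      push_cast at hInt
      omega⟩]
    have hstep : ((2 : Int) ^ j - 1) * 2 + 1 = (2 : Int) ^ (j + 1) - 1 := by ring
    rw [hstep]
    by_cases hnext : 2 ^ (j + 1) ≤ m + 1
    · have hjk' : j < k := by
        by_contra hge
        have hkj : k = j := by omega
        rw [hkj] at hk2
        omega
      exact ihd (k + 1 - (j + 1)) (by omega) (j + 1) rfl _ hnext
    · -- loop exits at mask = 2^(j+1) - 1 > m; result is 2^j - 1, and k = j
      have hkj : k = j := pv_bracket_unique hk1 hk2 hj (by omega)
      rw [pvMaskLoop]
      rw [dif_neg]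
      · rw [hkj]
      · rintro ⟨-, hle⟩
        apply hnext
        have hcst : ((2 ^ (j + 1) : Nat) : Int) ≤ (m : Int) + 1 := by push_cast at hle ⊢; omega
        exact_mod_cast hcst

lemma pv_A_eq (m k : Nat) (hk1 : 2 ^ k ≤ m + 1) (hk2 : m + 1 < 2 ^ (k + 1)) :
    NearestTwoPower (m : Int) = (2 : Int) ^ k - 1 := by
  unfold NearestTwoPower
  have hcast : (m : Int) + 1 = ((m + 1 : Nat) : Int) := by push_cast; ring
  have hband : PySem.Int.band (m : Int) ((m : Int) + 1) = ((m &&& (m + 1) : Nat) : Int) := by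
    rw [hcast]; exact PySem.Int.band_natCast m (m + 1)
  by_cases hz : m &&& (m + 1) = 0
  · rw [if_pos (by rw [hband, hz]; rfl)]
    obtain ⟨t, ht⟩ := (pv_land_succ_iff m).mp hz
    have htk : t = k := pv_bracket_unique (x := m + 1) (by omega) (by
      have : 2 ^ t < 2 ^ (t + 1) := Nat.pow_lt_pow_right (by omega) (by omega)
      omega) hk1 hk2
    rw [htk] at ht
    have : m = 2 ^ k - 1 := by omega
    subst this
    have : (1 : Nat) ≤ 2 ^ k := Nat.one_le_two_pow
    push_cast [this]
    ring
  · rw [if_neg (by rw [hband]; exact_mod_cast hz)]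
    rw [pv_countA_eq m 0]
    set B := PySem.Int.bitLength (m : Int) with hB
    have hmne : m ≠ 0 := by
      rintro rfl
      exact hz (by rfl)
    have hlow : 2 ^ (B - 1) ≤ m := by
      have := PySem.Int.two_pow_bitLength_le (m : Int) (by exact_mod_cast hmne)
      simpa using this
    have hhigh : m < 2 ^ B := by
      have := PySem.Int.lt_two_pow_bitLength (m : Int)
      simpa using this
    have hB1 : 1 ≤ B := by
      by_contra h
      have : B = 0 := by omega
      rw [this] at hhigh
      simp at hhigh
      omega
    have hne : m + 1 ≠ 2 ^ B := by
      intro he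
      exact hz ((pv_land_succ_iff m).mpr ⟨B, he⟩)
    have hkB : k = B - 1 := by
      apply pv_bracket_unique hk1 hk2 (x := m + 1)
      · have h1 : (1:Nat) ≤ 2 ^ (B-1) := Nat.one_le_two_pow
        omega
      · have : B - 1 + 1 = B := by omega
        rw [this]
        omega
    have : ((0 : Int) + (B : Int) - 1).toNat = B - 1 := by omega
    rw [this, hkB]

-- ===== VERDICT (by name: the statement is the Claim_ definition above) =====
theorem NearestTwoPower_spec : Claim_equal_NearestTwoPower := by
  intro input_val hdom hpre
  unfold Spec_NearestTwoPower
  obtain ⟨m, rfl⟩ := Int.eq_ofNat_of_zero_le hpre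
  have hk1 : 2 ^ Nat.log2 (m + 1) ≤ m + 1 := Nat.log2_self_le (by omega)
  have hk2 : m + 1 < 2 ^ (Nat.log2 (m + 1) + 1) := Nat.lt_log2_self
  rw [pv_A_eq m _ hk1 hk2]
  unfold NearestTwoPower_alt
  rw [show pvMaskLoop 0 0 (m : Int) = pvMaskLoop 0 ((2:Int)^0 - 1) (m : Int) by norm_num]
  rw [pv_loopB m _ hk1 hk2 0 0 (by simp)]
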